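/-
  GENERATED by c/gen_globals.py from toy_GLOBALS.txt — do not edit; re-run the script when the image is rebuilt.

  The 3 globals registered with the sanitizer: the descriptor table at 0x141900 (what `_sub_I_65535_1` passes to
  `__asan_register_globals`), `.init_array`, and the evaluated facts `ShadowOK.register` asks for.
-/
import Asan.Runtime
namespace Toy.Globals
open Asan

/-- The address of the descriptor table (`.data..LASAN0`): the constructor's `edi`. -/
def table : Nat := 0x141900

/-- The number of descriptors: the constructor's `esi`. -/
def count : Nat := 3

/-- `calls`: 8 bytes at 0x141c00, slot of 64 bytes (red zone [0x141c08, 0x141c40)); descriptor at 0x141900. -/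
def calls : GlobalDesc := ⟨0x141c00, 8, 64⟩

/-- `fill_byte`: 1 bytes at 0x141800, slot of 64 bytes (red zone [0x141801, 0x141840)); descriptor at 0x141940. -/
def fill_byte : GlobalDesc := ⟨0x141800, 1, 64⟩

/-- `weights`: 4 bytes at 0x141200, slot of 64 bytes (red zone [0x141204, 0x141240)); descriptor at 0x141980. -/
def weights : GlobalDesc := ⟨0x141200, 4, 64⟩

/-- The table, in table order. -/
def descs : List GlobalDesc := [calls, fill_byte, weights]

/-- `.init_array`: (address of the entry, its value). -/
def initArray : List (Nat × Nat) := [(0x141000, 0x1054c0)]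

/-- The table has `count` descriptors. -/
theorem descs_length : descs.length = count := by decide

/-- Every descriptor is sane: 8-aligned slot, a whole number of granules, containing the global, inside the image. -/
theorem descs_ok : ∀ d, d ∈ descs → d.OK := by decide

/-- The slots are pairwise apart. -/
theorem descs_apart : descs.Pairwise GlobalDesc.Apart := by decide

/-- The objects `ShadowOK.register` adds for this table (reverse table order). -/
def objs : List Obj := (descs.map GlobalDesc.obj).reverse

/-- The runtime of this image, for the runtime symbols `S` (`Toy.Symbols.rt`). -/
def runtime (S : RtSymbols) : Runtime := ⟨S, table, descs⟩

end Toy.Globals
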